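-- pv_equiv track=rewrite | github.com/Ankhanh975/Smart-Clicker | Backup/V4/try/Preprocess_instruction.py | LoadKeyStrokes
-- ===== SOURCE A (Python) =====
-- def LoadKeyStrokes(data: str):
-- 	#Load from nomal KeyStrokes to list
-- 	data = data.replace("Caps", "capital")
-- 	data = data.replace("Ctrl", "control")
-- 	data = data.replace("Esc", "escape")
-- 	data = data.replace("Alt", "menu")
-- 	data = data.replace("SELECT", "K_SELECT")
-- 	data = data.replace("INSERT", "K_INSERT")
-- 	data = data.replace("DELETE", "K_DELETE")
-- 	data = data.replace("Backspace", "BACK")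
-- 	if "Fn"in data:
-- 		raise Exception("Sorry, we don't support Fn key")
--
-- 	a= data.split("+")
--
-- 	for x in range(len(a)):
-- 		a[x] = a[x].lower()
--
-- 	return a
-- ===== SOURCE B (Python) =====
-- def _normalize(token):
-- 	for old, new in (("Caps", "capital"), ("Ctrl", "control"), ("Esc", "escape"),
-- 			("Alt", "menu"), ("SELECT", "K_SELECT"), ("INSERT", "K_INSERT"),
-- 			("DELETE", "K_DELETE"), ("Backspace", "BACK")):
-- 		token = token.replace(old, new)
-- 	return token
--
-- def LoadKeyStrokes(data: str):
-- 	# split first, then normalize each token; none of the patterns/replacements contains '+'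
-- 	result = []
-- 	for token in data.split("+"):
-- 		token = _normalize(token)
-- 		if "Fn" in token:
-- 			raise Exception("Sorry, we don't support Fn key")
-- 		result.append(token.lower())
-- 	return result
-- ===== Notes on version B (the rewrite author's own statement) =====
-- stated objective: alternative
-- what changed: A transforms the whole string with eight replacements and then splits on '+'; B splits on '+' first and applies the replacements, the Fn check and lowercasing per token, building the result token by token.
import Mathlib
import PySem

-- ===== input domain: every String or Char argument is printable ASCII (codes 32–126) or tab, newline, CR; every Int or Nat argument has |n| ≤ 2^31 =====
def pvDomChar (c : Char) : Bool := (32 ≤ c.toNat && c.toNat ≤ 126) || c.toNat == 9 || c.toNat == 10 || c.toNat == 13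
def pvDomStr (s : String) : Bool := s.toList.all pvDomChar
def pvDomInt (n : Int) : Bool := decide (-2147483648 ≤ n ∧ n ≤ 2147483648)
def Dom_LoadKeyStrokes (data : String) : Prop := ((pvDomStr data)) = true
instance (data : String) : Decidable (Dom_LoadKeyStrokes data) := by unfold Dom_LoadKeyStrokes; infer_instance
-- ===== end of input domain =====

-- B splits on '+' first and normalizes each token (replacements, Fn check, lowercase) token by token,
-- where A applies the eight replacements to the whole string before splitting. Equivalence of the
-- RETURN values on inputs where A returns (A raises exactly on inputs containing "Fn"; excluded by Pre_).

-- ===== PORT A =====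
def LoadKeyStrokes (data : String) : List String :=
  let d1 := PySem.Str.replace data "Caps" "capital"
  let d2 := PySem.Str.replace d1 "Ctrl" "control"
  let d3 := PySem.Str.replace d2 "Esc" "escape"
  let d4 := PySem.Str.replace d3 "Alt" "menu"
  let d5 := PySem.Str.replace d4 "SELECT" "K_SELECT"
  let d6 := PySem.Str.replace d5 "INSERT" "K_INSERT"
  let d7 := PySem.Str.replace d6 "DELETE" "K_DELETE"
  let d8 := PySem.Str.replace d7 "Backspace" "BACK"
  if PySem.Str.isIn "Fn" d8 then []  -- Python raises Exception here (outside Pre_)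
  else
    let a := (PySem.Str.split? d8 "+").getD []
    a.map PySem.Str.lower  -- for x in range(len(a)): a[x] = a[x].lower()

-- ===== PORT B =====
def pvPairs : List (String × String) :=
  [("Caps", "capital"), ("Ctrl", "control"), ("Esc", "escape"), ("Alt", "menu"),
   ("SELECT", "K_SELECT"), ("INSERT", "K_INSERT"), ("DELETE", "K_DELETE"), ("Backspace", "BACK")]

def pvNormalize (token : String) : String :=
  pvPairs.foldl (fun t p => PySem.Str.replace t p.1 p.2) token

def pvLoop : List String → List String → List String
  | acc, [] => acc
  | acc, t :: ts =>
    let u := pvNormalize t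
    if PySem.Str.isIn "Fn" u then []  -- Python raises Exception here (outside Pre_)
    else pvLoop (acc ++ [PySem.Str.lower u]) ts

def LoadKeyStrokes_alt (data : String) : List String :=
  pvLoop [] ((PySem.Str.split? data "+").getD [])

-- ===== PRECONDITION & SPEC =====
-- Pre_ excludes exactly the inputs on which A raises: those containing "Fn" (no replacement
-- creates or destroys an occurrence of "Fn", since no pattern or replacement contains 'F',
-- no pattern contains 'n', and no replacement starts with 'n').
def Pre_LoadKeyStrokes (data : String) : Prop := PySem.Str.isIn "Fn" data = false
instance (data : String) : Decidable (Pre_LoadKeyStrokes data) := by unfold Pre_LoadKeyStrokes; infer_instance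
def pvWitness_LoadKeyStrokes : String := "Ctrl+Shift+a"

def Spec_LoadKeyStrokes (data : String) (out : List String) : Prop := out = LoadKeyStrokes_alt data
instance (data : String) (out : List String) : Decidable (Spec_LoadKeyStrokes data out) := by unfold Spec_LoadKeyStrokes; infer_instance

-- ===== CLAIM (what is proved, stated in full; the proofs are below) =====
def Claim_equal_LoadKeyStrokes : Prop := ∀ (data : String), Dom_LoadKeyStrokes data → Pre_LoadKeyStrokes data → Spec_LoadKeyStrokes data (LoadKeyStrokes data)

-- ===== LEMMAS AND PROOFS =====

-- structural version of Python str.replace for a nonempty pattern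
def pvRep (old new : List Char) : List Char → List Char
  | [] => []
  | c :: t =>
    if old.isPrefixOf (c :: t) then new ++ pvRep old new (t.drop (old.length - 1))
    else c :: pvRep old new t
termination_by s => s.length
decreasing_by
  · have h1 : (List.drop (old.length - 1) t).length = t.length - (old.length - 1) :=
      List.length_drop
    simp only [List.length_cons]
    omega
  · simp

-- structural version of splitting on '+'
def pvSplit : List Char → List (List Char)
  | [] => [[]]
  | c :: t => if c = '+' then [] :: pvSplit t else (pvSplit t).modifyHead (c :: ·)

lemma pvSplit_ne_nil (s : List Char) : pvSplit s ≠ [] := by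
  induction s with
  | nil => simp [pvSplit]
  | cons c t ih =>
    simp only [pvSplit]
    split
    · simp
    · intro h; exact ih (by simpa using congrArg List.length h)

lemma pvRep_go_eq (old new : List Char) (h : old ≠ []) :
    ∀ (fuel : Nat) (l acc : List Char), l.length ≤ fuel →
      PySem.Chars.replace.go old new fuel l acc = acc.reverse ++ pvRep old new l := by
  intro fuel
  induction fuel with
  | zero =>
    intro l acc hl
    have : l = [] := List.eq_nil_of_length_eq_zero (Nat.le_zero.mp hl)
    subst this
    simp [PySem.Chars.replace.go, pvRep]
  | succ n ih =>
    intro l acc hl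
    match l with
    | [] => simp [PySem.Chars.replace.go, pvRep]
    | c :: t =>
      rw [PySem.Chars.replace.go]
      by_cases hp : old.isPrefixOf (c :: t) = true
      · have hlen : 1 ≤ old.length := by
          cases old with | nil => exact absurd rfl h | cons _ _ => simp
        have hdrop : (c :: t).drop old.length = t.drop (old.length - 1) := by
          cases old with
          | nil => exact absurd rfl h
          | cons o os => simp
        rw [if_pos hp]
        have hle : ((c :: t).drop old.length).length ≤ n := by
          rw [hdrop]
          have h1 : (t.drop (old.length - 1)).length = t.length - (old.length - 1) :=
            List.length_drop
          simp only [List.length_cons] at hl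
          omega
        rw [ih _ _ hle]
        rw [pvRep, if_pos hp, hdrop]
        simp
      · rw [if_neg hp]
        rw [ih _ _ (by simp only [List.length_cons] at hl; omega)]
        rw [pvRep, if_neg hp]
        simp

lemma pvRep_eq (s old new : List Char) (h : old ≠ []) :
    PySem.Chars.replace s old new = pvRep old new s := by
  rw [PySem.Chars.replace]
  have : old.isEmpty = false := by cases old with | nil => exact absurd rfl h | cons _ _ => rfl
  rw [this]
  simpa using pvRep_go_eq old new h s.length s [] le_rfl

lemma pvSplit_go_eq :
    ∀ (fuel : Nat) (l cur : List Char) (acc : List (List Char)), l.length ≤ fuel →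
      PySem.Chars.splitOn.go ['+'] fuel l cur acc
        = acc.reverse ++ (pvSplit l).modifyHead (cur.reverse ++ ·) := by
  intro fuel
  induction fuel with
  | zero =>
    intro l cur acc hl
    have : l = [] := List.eq_nil_of_length_eq_zero (Nat.le_zero.mp hl)
    subst this
    simp [PySem.Chars.splitOn.go, pvSplit]
  | succ n ih =>
    intro l cur acc hl
    match l with
    | [] => simp [PySem.Chars.splitOn.go, pvSplit]
    | c :: t =>
      rw [PySem.Chars.splitOn.go]
      by_cases hc : c = '+'
      · subst hc
        have hp : List.isPrefixOf ['+'] ('+' :: t) = true := by simp [List.isPrefixOf]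
        rw [if_pos hp]
        rw [ih _ _ _ (by simp only [List.length_cons] at hl ⊢; simpa using by omega)]
        rw [pvSplit, if_pos rfl]
        simp
        cases hps : pvSplit t <;> simp
      · have hp : ¬ List.isPrefixOf ['+'] (c :: t) = true := by
          simp [List.isPrefixOf, Ne.symm hc]
        rw [if_neg hp]
        rw [ih _ _ _ (by simp only [List.length_cons] at hl; omega)]
        rw [pvSplit, if_neg hc]
        obtain ⟨h0, rest, hrest⟩ : ∃ h0 rest, pvSplit t = h0 :: rest := by
          cases hps : pvSplit t with
          | nil => exact absurd hps (pvSplit_ne_nil t)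
          | cons a b => exact ⟨a, b, rfl⟩
        simp [hrest]

lemma pvSplitOn_eq (s : List Char) : PySem.Chars.splitOn s ['+'] = pvSplit s := by
  rw [PySem.Chars.splitOn]
  rw [pvSplit_go_eq (s.length + 1) s [] [] (by omega)]
  simp only [List.reverse_nil, List.nil_append]
  cases hps : pvSplit s <;> simp

-- splitting a string with a '+'-free prefix
lemma pvSplit_append (p x : List Char) (hp : '+' ∉ p) :
    pvSplit (p ++ x) = (pvSplit x).modifyHead (p ++ ·) := by
  induction p with
  | nil => simp only [List.nil_append]; cases pvSplit x <;> simp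
  | cons c t ih =>
    have hc : c ≠ '+' := by intro h; exact hp (by simp [h])
    have ht : '+' ∉ t := fun h => hp (by simp [h])
    simp only [List.cons_append, pvSplit, hc, if_false, ih ht]
    obtain ⟨h0, rest, hrest⟩ : ∃ h0 rest, pvSplit x = h0 :: rest := by
      cases hps : pvSplit x with
      | nil => exact absurd hps (pvSplit_ne_nil x)
      | cons a b => exact ⟨a, b, rfl⟩
    simp [hrest]

-- the head of pvSplit s is a prefix of s (helper for pvSplit_rep; declared before use)
lemma pvSplit_head_prefix_aux (s : List Char) :
    ∀ h0 ∈ (pvSplit s).head?, h0 <+: s := by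
  induction s with
  | nil => simp [pvSplit]
  | cons c t ih =>
    simp only [pvSplit]
    split
    · simp
    · obtain ⟨h0, rest, hrest⟩ : ∃ h0 rest, pvSplit t = h0 :: rest := by
        cases hps : pvSplit t with
        | nil => exact absurd hps (pvSplit_ne_nil t)
        | cons a b => exact ⟨a, b, rfl⟩
      simp only [hrest, List.modifyHead_cons, List.head?_cons, Option.mem_def,
        Option.some.injEq]
      rintro x rfl
      exact List.cons_prefix_cons.mpr ⟨rfl, ih h0 (by simp [hrest])⟩

-- unfolding lemmas for pvRep
lemma pvRep_nil (old new : List Char) : pvRep old new [] = [] := by rw [pvRep]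

lemma pvRep_not_prefix (old new : List Char) (c : Char) (t : List Char)
    (hp : ¬ old.isPrefixOf (c :: t) = true) :
    pvRep old new (c :: t) = c :: pvRep old new t := by
  rw [pvRep, if_neg hp]

lemma pvRep_prefix (old new r : List Char) (h : old ≠ []) :
    pvRep old new (old ++ r) = new ++ pvRep old new r := by
  cases old with
  | nil => exact absurd rfl h
  | cons o os =>
    rw [List.cons_append, pvRep,
        if_pos (List.isPrefixOf_iff_prefix.mpr ⟨r, by simp⟩)]
    simp

-- replacement commutes with splitting on '+' when pattern and replacement avoid '+'
lemma pvSplit_rep (old new : List Char) (h : old ≠ []) (ho : '+' ∉ old) (hn : '+' ∉ new) :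
    ∀ s, pvSplit (pvRep old new s) = (pvSplit s).map (pvRep old new) := by
  intro s
  induction s using pvRep.induct (old := old) with
  | case1 => simp [pvRep_nil, pvSplit]
  | case2 c t hp ih =>
    obtain ⟨r, hr⟩ : ∃ r, old ++ r = c :: t := List.isPrefixOf_iff_prefix.mp hp
    have hr2 : r = t.drop (old.length - 1) := by
      have h1 : (old ++ r).drop old.length = r := by simp
      rw [hr] at h1
      cases old with
      | nil => exact absurd rfl h
      | cons o os => simpa using h1.symm
    rw [← hr2] at ih
    rw [← hr, pvRep_prefix old new r h, pvSplit_append new _ hn, ih,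
        pvSplit_append old r ho]
    obtain ⟨h0, rest, hrest⟩ : ∃ h0 rest, pvSplit r = h0 :: rest := by
      cases hps : pvSplit r with
      | nil => exact absurd hps (pvSplit_ne_nil r)
      | cons a b => exact ⟨a, b, rfl⟩
    simp only [hrest, List.modifyHead_cons, List.map_cons]
    congr 1
    exact (pvRep_prefix old new h0 h).symm
  | case3 c t hp ih =>
    rw [pvRep_not_prefix old new c t hp]
    by_cases hc : c = '+'
    · subst hc
      simp [pvSplit, ih, pvRep_nil]
    · obtain ⟨h0, rest, hrest⟩ : ∃ h0 rest, pvSplit t = h0 :: rest := by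
        cases hps : pvSplit t with
        | nil => exact absurd hps (pvSplit_ne_nil t)
        | cons a b => exact ⟨a, b, rfl⟩
      have hh0 : h0 <+: t := by
        have := pvSplit_head_prefix_aux t
        rw [hrest] at this; exact this h0 (by simp)
      have hp' : ¬ old.isPrefixOf (c :: h0) = true := by
        intro hb
        exact hp (List.isPrefixOf_iff_prefix.mpr
          ((List.isPrefixOf_iff_prefix.mp hb).trans (List.cons_prefix_cons.mpr ⟨rfl, hh0⟩)))
      simp only [pvSplit, hc, if_false, ih, hrest, List.modifyHead_cons, List.map_cons]
      congr 1
      exact (pvRep_not_prefix old new c h0 hp').symm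

-- a '+'-free prefix of s is a prefix of the first token
lemma pvSplit_head_prefix (fn : List Char) (hp : '+' ∉ fn) :
    ∀ s, fn <+: s → fn <+: (pvSplit s).headI := by
  induction fn with
  | nil => intro s _; simp
  | cons a fn' ih =>
    intro s hpre
    obtain ⟨r, hr⟩ := hpre
    subst hr
    have ha : a ≠ '+' := fun h => hp (by simp [h])
    have hfn' : '+' ∉ fn' := fun h => hp (by simp [h])
    simp only [List.cons_append, pvSplit, ha, if_false]
    obtain ⟨h0, rest, hrest⟩ : ∃ h0 rest, pvSplit (fn' ++ r) = h0 :: rest := by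
      cases hps : pvSplit (fn' ++ r) with
      | nil => exact absurd hps (pvSplit_ne_nil _)
      | cons x b => exact ⟨x, b, rfl⟩
    have := ih hfn' (fn' ++ r) ⟨r, rfl⟩
    rw [hrest] at this ⊢
    simp only [List.modifyHead_cons, List.headI] at this ⊢
    exact List.cons_prefix_cons.mpr ⟨rfl, this⟩

-- "Fn" occurs in s iff it occurs in some token of the split
lemma pvSplit_infix (fn : List Char) (hne : fn ≠ []) (hp : '+' ∉ fn) :
    ∀ s, (fn <:+: s ↔ ∃ t ∈ pvSplit s, fn <:+: t) := by
  intro s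
  induction s with
  | nil => simp [pvSplit]
  | cons c t ih =>
    rw [List.infix_cons_iff]
    by_cases hc : c = '+'
    · subst hc
      simp only [pvSplit, if_true]
      have hnp : ¬ fn <+: '+' :: t := by
        rintro hpre
        cases fn with
        | nil => exact hne rfl
        | cons a fn' =>
          obtain ⟨h1, _⟩ := List.cons_prefix_cons.mp hpre
          exact hp (by simp [h1])
      constructor
      · rintro (h | h)
        · exact absurd h hnp
        · obtain ⟨u, hu, hinf⟩ := ih.mp h
          exact ⟨u, by simp [hu], hinf⟩
      · rintro ⟨u, hu, hinf⟩
        simp only [List.mem_cons] at hu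
        rcases hu with rfl | hu
        · exact absurd (List.eq_nil_of_infix_nil hinf) hne
        · exact Or.inr (ih.mpr ⟨u, hu, hinf⟩)
    · simp only [pvSplit, hc, if_false]
      obtain ⟨h0, rest, hrest⟩ : ∃ h0 rest, pvSplit t = h0 :: rest := by
        cases hps : pvSplit t with
        | nil => exact absurd hps (pvSplit_ne_nil t)
        | cons a b => exact ⟨a, b, rfl⟩
      rw [hrest]
      simp only [List.modifyHead_cons, List.mem_cons]
      have hh0 : h0 <+: t := by
        have := pvSplit_head_prefix_aux t
        rw [hrest] at this; exact this h0 rfl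
      have key : fn <+: c :: t ↔ fn <+: c :: h0 := by
        constructor
        · intro h
          have := pvSplit_head_prefix fn hp (c :: t) h
          simp only [pvSplit, hc, if_false, hrest, List.modifyHead_cons, List.headI] at this
          exact this
        · intro h
          exact h.trans (List.cons_prefix_cons.mpr ⟨rfl, hh0⟩)
      rw [ih, hrest]
      constructor
      · rintro (h | ⟨u, hu, hinf⟩)
        · exact ⟨c :: h0, Or.inl rfl, (key.mp h).isInfix⟩
        · simp only [List.mem_cons] at hu
          rcases hu with heq | hu
          · refine ⟨c :: h0, Or.inl rfl, ?_⟩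
            subst heq
            rcases hinf with ⟨p, q, hpq⟩
            exact ⟨c :: p, q, by simp [← hpq]⟩
          · exact ⟨u, Or.inr hu, hinf⟩
      · rintro ⟨u, hu, hinf⟩
        rcases hu with rfl | hu
        · rw [List.infix_cons_iff] at hinf
          rcases hinf with h | h
          · exact Or.inl (key.mpr h)
          · exact Or.inr ⟨h0, by simp, h⟩
        · exact Or.inr ⟨u, by simp [hu], hinf⟩

-- the eight replacements at character level, in A's order
def pvR8 (cs : List Char) : List Char :=
  pvRep "Backspace".toList "BACK".toList
    (pvRep "DELETE".toList "K_DELETE".toList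
      (pvRep "INSERT".toList "K_INSERT".toList
        (pvRep "SELECT".toList "K_SELECT".toList
          (pvRep "Alt".toList "menu".toList
            (pvRep "Esc".toList "escape".toList
              (pvRep "Ctrl".toList "control".toList
                (pvRep "Caps".toList "capital".toList cs)))))))

lemma pvSplit_R8 (cs : List Char) : pvSplit (pvR8 cs) = (pvSplit cs).map pvR8 := by
  unfold pvR8
  rw [pvSplit_rep _ _ (by decide) (by decide) (by decide),
      pvSplit_rep _ _ (by decide) (by decide) (by decide),
      pvSplit_rep _ _ (by decide) (by decide) (by decide),
      pvSplit_rep _ _ (by decide) (by decide) (by decide),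
      pvSplit_rep _ _ (by decide) (by decide) (by decide),
      pvSplit_rep _ _ (by decide) (by decide) (by decide),
      pvSplit_rep _ _ (by decide) (by decide) (by decide),
      pvSplit_rep _ _ (by decide) (by decide) (by decide)]
  simp [List.map_map]

-- normalization at string level is pvR8 at character level
lemma pvNormalize_ofList (t : List Char) :
    pvNormalize (String.ofList t) = String.ofList (pvR8 t) := by
  simp only [pvNormalize, pvPairs, List.foldl_cons, List.foldl_nil, PySem.Str.replace,
    String.toList_ofList]
  rw [pvRep_eq _ ("Backspace".toList) ("BACK".toList) (by decide),
      pvRep_eq _ ("DELETE".toList) ("K_DELETE".toList) (by decide),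
      pvRep_eq _ ("INSERT".toList) ("K_INSERT".toList) (by decide),
      pvRep_eq _ ("SELECT".toList) ("K_SELECT".toList) (by decide),
      pvRep_eq _ ("Alt".toList) ("menu".toList) (by decide),
      pvRep_eq _ ("Esc".toList) ("escape".toList) (by decide),
      pvRep_eq _ ("Ctrl".toList) ("control".toList) (by decide),
      pvRep_eq _ ("Caps".toList) ("capital".toList) (by decide)]
  rw [pvR8]

-- splitting a string on "+" at character level
lemma pvSplitStr (s : String) :
    (PySem.Str.split? s "+").getD [] = (pvSplit s.toList).map String.ofList := by
  have hplus : ("+" : String).toList = ['+'] := by decide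
  simp only [PySem.Str.split?, hplus, PySem.Chars.split?]
  rw [if_neg (by decide), pvSplitOn_eq]
  simp

-- port A at character level
lemma portA_char (data : String) :
    LoadKeyStrokes data =
      (if PySem.Chars.isIn "Fn".toList (pvR8 data.toList) then []
       else (pvSplit (pvR8 data.toList)).map (fun t => String.ofList (PySem.Chars.lower t))) := by
  have hchain : PySem.Str.replace (PySem.Str.replace (PySem.Str.replace (PySem.Str.replace
      (PySem.Str.replace (PySem.Str.replace (PySem.Str.replace (PySem.Str.replace data
      "Caps" "capital") "Ctrl" "control") "Esc" "escape") "Alt" "menu") "SELECT" "K_SELECT")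
      "INSERT" "K_INSERT") "DELETE" "K_DELETE") "Backspace" "BACK"
      = String.ofList (pvR8 data.toList) := by
    simp only [PySem.Str.replace, String.toList_ofList]
    rw [pvRep_eq _ ("Backspace".toList) ("BACK".toList) (by decide),
        pvRep_eq _ ("DELETE".toList) ("K_DELETE".toList) (by decide),
        pvRep_eq _ ("INSERT".toList) ("K_INSERT".toList) (by decide),
        pvRep_eq _ ("SELECT".toList) ("K_SELECT".toList) (by decide),
        pvRep_eq _ ("Alt".toList) ("menu".toList) (by decide),
        pvRep_eq _ ("Esc".toList) ("escape".toList) (by decide),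
        pvRep_eq _ ("Ctrl".toList) ("control".toList) (by decide),
        pvRep_eq _ ("Caps".toList) ("capital".toList) (by decide)]
    rw [pvR8]
  show (let d1 := PySem.Str.replace data "Caps" "capital"
        let d2 := PySem.Str.replace d1 "Ctrl" "control"
        let d3 := PySem.Str.replace d2 "Esc" "escape"
        let d4 := PySem.Str.replace d3 "Alt" "menu"
        let d5 := PySem.Str.replace d4 "SELECT" "K_SELECT"
        let d6 := PySem.Str.replace d5 "INSERT" "K_INSERT"
        let d7 := PySem.Str.replace d6 "DELETE" "K_DELETE"
        let d8 := PySem.Str.replace d7 "Backspace" "BACK"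
        if PySem.Str.isIn "Fn" d8 then []
        else
          let a := (PySem.Str.split? d8 "+").getD []
          a.map PySem.Str.lower) = _
  simp only [hchain, PySem.Str.isIn, String.toList_ofList, pvSplitStr]
  split
  · rfl
  · simp [PySem.Str.lower, List.map_map, Function.comp_def]

-- port B's loop, characterized
lemma pvLoop_eq (toks : List (List Char)) (acc : List String) :
    pvLoop acc (toks.map String.ofList) =
      (if toks.any (fun t => PySem.Chars.isIn "Fn".toList (pvR8 t)) then []
       else acc ++ toks.map (fun t => String.ofList (PySem.Chars.lower (pvR8 t)))) := by
  induction toks generalizing acc with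
  | nil => simp [pvLoop]
  | cons t ts ih =>
    simp only [List.map_cons, pvLoop, pvNormalize_ofList, PySem.Str.isIn, String.toList_ofList]
    by_cases hb : PySem.Chars.isIn "Fn".toList (pvR8 t) = true
    · rw [if_pos hb]
      simp only [List.any_cons, hb, Bool.true_or, if_true]
    · rw [Bool.not_eq_true] at hb
      rw [if_neg (by rw [hb]; exact Bool.false_ne_true), ih]
      simp only [List.any_cons, hb, Bool.false_or]
      split
      · rfl
      · simp only [PySem.Str.lower, String.toList_ofList, List.append_assoc,
          List.singleton_append]

-- port B at character level
lemma portB_char (data : String) :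
    LoadKeyStrokes_alt data =
      (if (pvSplit data.toList).any (fun t => PySem.Chars.isIn "Fn".toList (pvR8 t)) then []
       else (pvSplit data.toList).map (fun t => String.ofList (PySem.Chars.lower (pvR8 t)))) := by
  rw [LoadKeyStrokes_alt, pvSplitStr, pvLoop_eq]
  simp

-- ===== VERDICT (by name: the statement is the Claim_ definition above) =====
theorem LoadKeyStrokes_spec : Claim_equal_LoadKeyStrokes := by
  intro data _ _
  unfold Spec_LoadKeyStrokes
  rw [portA_char, portB_char]
  have hiff : PySem.Chars.isIn "Fn".toList (pvR8 data.toList)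
      = (pvSplit data.toList).any (fun t => PySem.Chars.isIn "Fn".toList (pvR8 t)) := by
    rw [Bool.eq_iff_iff]
    rw [PySem.Chars.isIn_iff_infix]
    rw [pvSplit_infix "Fn".toList (by decide) (by decide) (pvR8 data.toList)]
    rw [pvSplit_R8]
    simp only [List.any_eq_true, List.mem_map, PySem.Chars.isIn_iff_infix]
    constructor
    · rintro ⟨u, ⟨v, hv, rfl⟩, hinf⟩
      exact ⟨v, hv, hinf⟩
    · rintro ⟨v, hv, hinf⟩
      exact ⟨pvR8 v, ⟨v, hv, rfl⟩, hinf⟩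
  rw [hiff, pvSplit_R8, List.map_map]
  split
  · rfl
  · rfl
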